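-- pv_equiv track=rewrite | github.com/DragonZero000/Conf_manage2 | main.py | get_deps
-- ===== SOURCE A (Python) =====
-- def get_deps(pkg, ver, all_entries):
--     entries = all_entries.get(pkg, [])
--     if not entries:
--         raise Exception(f"Package {pkg} not found")
--     selected_ver = None
--     if ver == 'latest':
--         vers = [v for v, d in entries if v is not None]
--         if vers:
--             selected_ver = max(vers)
--         else:
--             selected_ver = None
--     else:
--         selected_ver = ver
--     for v, d in entries:
--         if v == selected_ver:
--             return d
--     raise Exception(f"Version {ver} for {pkg} not found")
-- ===== SOURCE B (Python) =====
-- def get_deps(pkg, ver, all_entries):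
--     entries = all_entries.get(pkg, [])
--     if not entries:
--         raise Exception(f"Package {pkg} not found")
--     if ver == 'latest':
--         best_ver, best_deps = None, None
--         for v, d in entries:
--             if v is not None and (best_ver is None or v > best_ver):
--                 best_ver, best_deps = v, d
--         if best_ver is not None:
--             return best_deps
--         # all versions are None: the first entry matches selected_ver = None
--         return entries[0][1]
--     matches = [d for v, d in entries if v == ver]
--     if matches:
--         return matches[0]
--     raise Exception(f"Version {ver} for {pkg} not found")
-- ===== Notes on version B (the rewrite author's own statement) =====
-- stated objective: alternative
-- what changed: The 'latest' branch builds no version list: one pass keeps the best version seen (strict > so the first maximum wins) and its deps, falling back to the first entry when all versions are None; the exact-version branch is a filter-then-head instead of an early-return scan.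
import Mathlib
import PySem

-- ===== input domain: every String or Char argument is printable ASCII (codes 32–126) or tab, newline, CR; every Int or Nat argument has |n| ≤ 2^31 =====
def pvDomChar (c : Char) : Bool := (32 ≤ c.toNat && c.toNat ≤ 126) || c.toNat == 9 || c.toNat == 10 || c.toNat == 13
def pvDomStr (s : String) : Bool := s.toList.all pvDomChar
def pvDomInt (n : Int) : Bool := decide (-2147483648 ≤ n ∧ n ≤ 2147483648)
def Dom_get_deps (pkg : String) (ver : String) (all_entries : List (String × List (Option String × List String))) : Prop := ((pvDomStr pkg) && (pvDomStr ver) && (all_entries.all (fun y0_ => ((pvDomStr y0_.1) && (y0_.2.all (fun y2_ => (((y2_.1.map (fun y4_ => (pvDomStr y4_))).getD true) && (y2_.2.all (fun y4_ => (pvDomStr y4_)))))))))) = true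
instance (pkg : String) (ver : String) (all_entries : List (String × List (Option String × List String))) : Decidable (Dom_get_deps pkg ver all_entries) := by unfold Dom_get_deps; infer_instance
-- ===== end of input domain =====

-- B replaces the latest-branch's "comprehension + max + rescan" with a single best-so-far pass
-- (and the exact-version scan with filter-then-head): an alternative decomposition, same O(n) cost.

-- ===== PORT A =====
-- the final 'for v, d in entries: if v == selected_ver: return d' loop of A
def pvFindVer (sel : Option String) : List (Option String × List String) → List String
  | [] => []
  | (v, d) :: rest => if v = sel then d else pvFindVer sel rest

def get_deps (pkg : String) (ver : String) (all_entries : List (String × List (Option String × List String))) : List String :=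
  let entries := ((PySem.Dict.mk all_entries).get? pkg).getD []
  if entries = [] then []  -- A raises "Package not found" here; excluded by Pre_
  else
    let selected : Option String :=
      if ver = "latest" then PySem.List.max? (entries.filterMap (·.1)) (fun y => y)
      else some ver
    pvFindVer selected entries  -- returns [] where A raises "Version not found"; excluded by Pre_

-- ===== PORT B =====
-- B's single pass keeping the best (largest, first-wins) non-None version and its deps
def pvBestLoop : List (Option String × List String) → Option (String × List String) → Option (String × List String)
  | [], best => best
  | (none, _) :: rest, best => pvBestLoop rest best
  | (some v, d) :: rest, best =>
      match best with
      | none => pvBestLoop rest (some (v, d))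
      | some (b, bd) => if b < v then pvBestLoop rest (some (v, d)) else pvBestLoop rest (some (b, bd))

def get_deps_alt (pkg : String) (ver : String) (all_entries : List (String × List (Option String × List String))) : List String :=
  let entries := ((PySem.Dict.mk all_entries).get? pkg).getD []
  match entries with
  | [] => []  -- B raises "Package not found" here; excluded by Pre_
  | e0 :: _ =>
    if ver = "latest" then
      match pvBestLoop entries none with
      | some (_, d) => d
      | none => e0.2  -- all versions None: first entry's deps
    else
      (entries.filterMap (fun e => if e.1 = some ver then some e.2 else none)).headD []
      -- returns [] where B raises "Version not found"; excluded by Pre_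

-- ===== PRECONDITION & SPEC =====
-- Pre_ excludes exactly the inputs where A raises: pkg absent (or mapped to an empty entry list),
-- and, for ver ≠ 'latest', no entry carrying exactly that version ('latest' never raises on a
-- nonempty entry list). B raises the same exceptions there.
def Pre_get_deps (pkg : String) (ver : String) (all_entries : List (String × List (Option String × List String))) : Prop :=
  let entries := ((PySem.Dict.mk all_entries).get? pkg).getD []
  entries ≠ [] ∧ (ver ≠ "latest" → some ver ∈ entries.map (·.1))
instance (pkg : String) (ver : String) (all_entries : List (String × List (Option String × List String))) : Decidable (Pre_get_deps pkg ver all_entries) := by unfold Pre_get_deps; infer_instance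

def pvWitness_get_deps : String × String × (List (String × List (Option String × List String))) :=
  ("a", "latest", [("a", [(some "1", ["x"]), (none, ["y"])])])

def Spec_get_deps (pkg : String) (ver : String) (all_entries : List (String × List (Option String × List String))) (out : List String) : Prop := out = get_deps_alt pkg ver all_entries
instance (pkg : String) (ver : String) (all_entries : List (String × List (Option String × List String))) (out : List String) : Decidable (Spec_get_deps pkg ver all_entries out) := by unfold Spec_get_deps; infer_instance

-- ===== CLAIM (what is proved, stated in full; the proofs are below) =====
def Claim_equal_get_deps : Prop := ∀ (pkg : String) (ver : String) (all_entries : List (String × List (Option String × List String))), Dom_get_deps pkg ver all_entries → Pre_get_deps pkg ver all_entries → Spec_get_deps pkg ver all_entries (get_deps pkg ver all_entries)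

-- ===== LEMMAS AND PROOFS =====

-- exact-version branch: A's first-match scan is B's filter-then-head
theorem pvFind_eq_filterHead (w : String) :
    ∀ l : List (Option String × List String),
      pvFindVer (some w) l = (l.filterMap (fun e => if e.1 = some w then some e.2 else none)).headD [] := by
  intro l
  induction l with
  | nil => rfl
  | cons e rest ih =>
    obtain ⟨v, d⟩ := e
    by_cases h : v = some w
    · simp [pvFindVer, h]
    · simp [pvFindVer, h, ih]

-- the best-so-far loop with a live accumulator, characterised via A's running max and scan
theorem pvBestLoop_some :
    ∀ (l : List (Option String × List String)) (b : String) (bd : List String),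
      pvBestLoop l (some (b, bd)) =
        some ((l.filterMap (·.1)).foldl max b,
              if (l.filterMap (·.1)).foldl max b = b then bd
              else pvFindVer (some ((l.filterMap (·.1)).foldl max b)) l) := by
  intro l
  induction l with
  | nil => intro b bd; simp [pvBestLoop]
  | cons e rest ih =>
    intro b bd
    obtain ⟨v?, d⟩ := e
    cases v? with
    | none =>
      simp only [pvBestLoop, List.filterMap_cons, ih]
      refine congrArg some (Prod.ext rfl ?_)
      by_cases h : (rest.filterMap (·.1)).foldl max b = b
      · simp [h]
      · simp [h, pvFindVer]
    | some v =>
      simp only [pvBestLoop, List.filterMap_cons, List.foldl_cons]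
      by_cases hlt : b < v
      · rw [if_pos hlt, ih]
        have hbv : max b v = v := max_eq_right (le_of_lt hlt)
        have hle : v ≤ (rest.filterMap (·.1)).foldl max v := (PySem.List.le_foldl_max _ _).1
        rw [hbv]
        refine congrArg some (Prod.ext rfl ?_)
        by_cases h : (rest.filterMap (·.1)).foldl max v = v
        · rw [h]
          simp [pvFindVer, hlt.ne']
        · have hnb : (rest.filterMap (·.1)).foldl max v ≠ b := by
            intro hc; exact absurd (hc ▸ hle) (not_le.mpr hlt)
          have hnv : some v ≠ some ((rest.filterMap (·.1)).foldl max v) := by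
            simpa using fun hc => h hc.symm
          simp [h, hnb, pvFindVer, hnv]
      · rw [if_neg hlt, ih]
        have hbv : max b v = b := max_eq_left (not_lt.mp hlt)
        rw [hbv]
        refine congrArg some (Prod.ext rfl ?_)
        by_cases h : (rest.filterMap (·.1)).foldl max b = b
        · simp [h]
        · have hle : b ≤ (rest.filterMap (·.1)).foldl max b := (PySem.List.le_foldl_max _ _).1
          have hnv : some v ≠ some ((rest.filterMap (·.1)).foldl max b) := by
            intro hc
            have hvM : v = (rest.filterMap (·.1)).foldl max b := by simpa using hc
            exact h (le_antisymm (hvM ▸ not_lt.mp hlt) hle)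
          simp [h, pvFindVer, hnv]

-- the best-so-far loop finds nothing exactly when no entry has a version
theorem pvBestLoop_none_iff :
    ∀ l : List (Option String × List String),
      pvBestLoop l none = none ↔ l.filterMap (·.1) = [] := by
  intro l
  induction l with
  | nil => simp [pvBestLoop]
  | cons e rest ih =>
    obtain ⟨v?, d⟩ := e
    cases v? with
    | none => simpa [pvBestLoop] using ih
    | some v => simp [pvBestLoop, pvBestLoop_some]

-- 'latest' branch: A's max-then-scan equals B's single pass (with first-entry fallback)
theorem pvLatest_eq :
    ∀ l : List (Option String × List String),
      pvFindVer (PySem.List.max? (l.filterMap (·.1)) (fun y => y)) l =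
        (match pvBestLoop l none with
         | some (_, d) => d
         | none => match l with | [] => [] | e :: _ => e.2) := by
  intro l
  induction l with
  | nil => rfl
  | cons e rest ih =>
    obtain ⟨v?, d⟩ := e
    cases v? with
    | none =>
      by_cases hrest : rest.filterMap (·.1) = []
      · have h1 : pvBestLoop rest none = none := (pvBestLoop_none_iff rest).mpr hrest
        simp [pvFindVer, pvBestLoop, hrest, h1, PySem.List.max?]
      · obtain ⟨v, vs, hv⟩ : ∃ v vs, rest.filterMap (·.1) = v :: vs := by
          cases hfm : rest.filterMap (·.1) with
          | nil => exact absurd hfm hrest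
          | cons a as => exact ⟨a, as, rfl⟩
        have h1 : pvBestLoop rest none ≠ none := fun hc =>
          hrest ((pvBestLoop_none_iff rest).mp hc)
        simp only [List.filterMap_cons, pvBestLoop]
        rw [hv, PySem.List.max?_id_cons] at ih ⊢
        rw [show pvFindVer (some (vs.foldl max v)) ((none, d) :: rest)
              = pvFindVer (some (vs.foldl max v)) rest by simp [pvFindVer]]
        rw [ih]
        cases hb : pvBestLoop rest none with
        | none => exact absurd hb h1
        | some p => rfl
    | some v =>
      simp only [List.filterMap_cons, pvBestLoop, PySem.List.max?_id_cons]
      rw [pvBestLoop_some]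
      by_cases h : (rest.filterMap (·.1)).foldl max v = v
      · simp [pvFindVer, h]
      · have hnv : some v ≠ some ((rest.filterMap (·.1)).foldl max v) := by
          simpa using fun hc => h hc.symm
        simp [pvFindVer, h, hnv]

-- ===== VERDICT (by name: the statement is the Claim_ definition above) =====
theorem get_deps_spec : Claim_equal_get_deps := by
  intro pkg ver all_entries _hdom hpre
  unfold Spec_get_deps get_deps get_deps_alt
  simp only []
  obtain ⟨hne, -⟩ := hpre
  cases hE : ((PySem.Dict.mk all_entries).get? pkg).getD [] with
  | nil => exact absurd hE hne
  | cons e0 rest =>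
    by_cases hv : ver = "latest"
    · simp only [hv, if_neg (List.cons_ne_nil e0 rest)]
      exact pvLatest_eq (e0 :: rest)
    · simp only [if_neg hv, if_neg (List.cons_ne_nil e0 rest)]
      exact pvFind_eq_filterHead ver (e0 :: rest)
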